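-- pv_equiv track=rewrite | github.com/joshanashakya/dissertation | workspace/dataset/java-python/GeeksForGeeks/2540/A/2.py | sumofproduct
-- ===== SOURCE A (Python) =====
-- import math
--
-- def sumOfRange(a, b):
--     # n*(n+1)/2.
--     i = (a * (a + 1)) >> 1;
--     j = (b * (b + 1)) >> 1;
--     return (i - j);
--
-- def sumofproduct(n):
--     sum = 0;
--
--     # Iterating i from 1 to sqrt(n)
--     root = int(math.sqrt(n));
--     for i in range(1, root + 1):
--         # Finding the upper limit.
--         up = int(n / i);
--
--         # Finding the lower limit.
--         low = max(int(n / (i + 1)), root);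
--
--         sum += (i * sumOfRange(up, low));
--         sum += (i * int(n / i));
--
--     return sum;
-- ===== SOURCE B (Python) =====
-- def sumofproduct(n):
--     # Quotient-block summation: while i <= n, all t in [i, j] share q = n // t,
--     # where j = n // q; add q * (sum of t over the block) and jump to j + 1.
--     total = 0
--     i = 1
--     while i <= n:
--         q = n // i
--         j = n // q
--         total += q * (j * (j + 1) // 2 - (i - 1) * i // 2)
--         i = j + 1
--     return total
-- ===== Notes on version B (the rewrite author's own statement) =====
-- stated objective: alternative
-- what changed: Replaces A's for-loop over i = 1..sqrt(n) (per-i clipped triangular range plus a separate i*floor(n/i) term) by a two-pointer while loop over quotient blocks: i jumps to n//(n//i)+1 and each block [i, n//q] contributes q times its triangular sum, covering t = 1..n uniformly.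
-- crash fix: On negative n, A raises ValueError (math.sqrt domain error) while B's while loop never runs and it returns 0. — e.g. on sumofproduct(-1): A raises ValueError, B returns 0
import Mathlib
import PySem

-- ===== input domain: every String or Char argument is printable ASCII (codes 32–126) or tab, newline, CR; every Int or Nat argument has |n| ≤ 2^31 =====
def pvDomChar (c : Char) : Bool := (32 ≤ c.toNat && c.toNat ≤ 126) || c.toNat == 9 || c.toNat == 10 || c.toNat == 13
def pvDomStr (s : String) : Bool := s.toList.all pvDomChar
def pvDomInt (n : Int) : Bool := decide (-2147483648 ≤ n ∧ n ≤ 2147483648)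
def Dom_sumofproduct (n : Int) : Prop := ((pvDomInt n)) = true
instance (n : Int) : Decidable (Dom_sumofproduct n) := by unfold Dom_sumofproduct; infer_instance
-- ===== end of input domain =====

-- B replaces A's for-loop over i = 1..√n (clipped triangular range plus a separate i·⌊n/i⌋ term)
-- by a two-pointer while loop over quotient blocks (alternative decomposition, same cost).

-- ===== PORT A =====
def sumOfRangeA (a b : Int) : Int :=
  -- 'x >> 1' on a Python int is floor division by 2
  let i := PySem.Int.floordiv (a * (a + 1)) 2
  let j := PySem.Int.floordiv (b * (b + 1)) 2
  i - j

def sumofproduct (n : Int) : Int :=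
  -- int(math.sqrt(n)) = Nat.sqrt n.toNat : exact for 0 ≤ n ≤ 2^31 (double sqrt is correctly
  -- rounded and cannot cross an integer below 2^52); n < 0 raises ValueError → outside Pre_.
  let root : Int := ((Nat.sqrt n.toNat : Nat) : Int)
  (PySem.List.pyRange 1 (root + 1) 1).foldl
    (fun sum i =>
      -- int(n / i): float division, exact (= n // i) for 0 ≤ n ≤ 2^31, 1 ≤ i
      let up := PySem.Int.floordiv n i
      let low := max (PySem.Int.floordiv n (i + 1)) root
      sum + i * sumOfRangeA up low + i * PySem.Int.floordiv n i) 0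

-- ===== PORT B =====
-- the while loop, fuel-bounded for totality: each iteration moves i to n//(n//i)+1 > i,
-- so n.toNat + 1 steps always suffice on the reachable states (proved in altLoop_eq below)
def altLoop (n : Int) (fuel : Nat) (i : Int) (total : Int) : Int :=
  match fuel with
  | 0 => total
  | fuel + 1 =>
    if i ≤ n then
      let q := PySem.Int.floordiv n i
      let j := PySem.Int.floordiv n q
      altLoop n fuel (j + 1)
        (total + q * (PySem.Int.floordiv (j * (j + 1)) 2 - PySem.Int.floordiv ((i - 1) * i) 2))
    else total

def sumofproduct_alt (n : Int) : Int := altLoop n (n.toNat + 1) 1 0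

-- ===== PRECONDITION & SPEC =====
-- A raises ValueError (math.sqrt of a negative number) for n < 0; it returns on every n ≥ 0.
def Pre_sumofproduct (n : Int) : Prop := 0 ≤ n
instance (n : Int) : Decidable (Pre_sumofproduct n) := by unfold Pre_sumofproduct; infer_instance
def pvWitness_sumofproduct : Int := (10)

-- On negative n, A raises ValueError (math.sqrt domain error) while B's while loop never runs and it returns 0.
def Raises_sumofproduct (n : Int) : Prop := n < 0
instance (n : Int) : Decidable (Raises_sumofproduct n) := by unfold Raises_sumofproduct; infer_instance
def pvRaiseWitness_sumofproduct : Int := (-1)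
def pvRaiseWitnessOut_sumofproduct : Int := 0

def Spec_sumofproduct (n : Int) (out : Int) : Prop := out = sumofproduct_alt n
instance (n : Int) (out : Int) : Decidable (Spec_sumofproduct n out) := by unfold Spec_sumofproduct; infer_instance

-- ===== CLAIM (what is proved, stated in full; the proofs are below) =====
def Claim_equal_sumofproduct : Prop := ∀ (n : Int), Dom_sumofproduct n → Pre_sumofproduct n → Spec_sumofproduct n (sumofproduct n)
def Claim_raises_sumofproduct : Prop := (∀ (n : Int), Dom_sumofproduct n → Raises_sumofproduct n → ¬ Pre_sumofproduct n) ∧ (Dom_sumofproduct (pvRaiseWitness_sumofproduct) ∧ Raises_sumofproduct (pvRaiseWitness_sumofproduct) ∧ sumofproduct_alt (pvRaiseWitness_sumofproduct) = pvRaiseWitnessOut_sumofproduct)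

-- ===== LEMMAS AND PROOFS =====

-- triangular number as the ports compute it: ⌊x(x+1)/2⌋ over ℕ, viewed in ℤ
def triZ (x : Nat) : Int := ((x * (x + 1) / 2 : Nat) : Int)

theorem triZ_succ (b : Nat) : triZ (b + 1) = triZ b + (b + 1) := by
  unfold triZ
  have h1 : b * (b + 1) / 2 * 2 = b * (b + 1) :=
    Nat.div_mul_cancel (Nat.even_mul_succ_self b).two_dvd
  have h2 : (b + 1) * (b + 2) / 2 * 2 = (b + 1) * (b + 2) :=
    Nat.div_mul_cancel (Nat.even_mul_succ_self (b + 1)).two_dvd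
  have h3 : (b + 1) * (b + 2) = b * (b + 1) + 2 * (b + 1) := by ring
  have h4 : (b + 1) * (b + 1 + 1) = (b + 1) * (b + 2) := by ring
  have : (b + 1) * (b + 1 + 1) / 2 = b * (b + 1) / 2 + (b + 1) := by rw [h4]; omega
  rw [this]; push_cast; ring

theorem gauss_Ioc (a b : Nat) (h : a ≤ b) :
    (∑ j ∈ Finset.Ioc a b, (j : Int)) = triZ b - triZ a := by
  induction b, h using Nat.le_induction with
  | base => simp
  | succ b hab ih =>
      rw [Finset.sum_Ioc_succ_top hab, ih, triZ_succ]
      push_cast; ring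

theorem floordiv_tri (u : Nat) :
    PySem.Int.floordiv ((u : Int) * ((u : Int) + 1)) 2 = triZ u := by
  have : ((u : Int) * ((u : Int) + 1)) = ((u * (u + 1) : Nat) : Int) := by push_cast; ring
  rw [this]
  exact_mod_cast PySem.Int.floordiv_natCast (u * (u + 1)) 2

-- A's port as a ℕ-indexed Finset sum
theorem aEq (N : Nat) :
    sumofproduct (N : Int) =
      ∑ i ∈ Finset.Icc 1 N.sqrt,
        ((i : Int) * (triZ (N / i) - triZ (max (N / (i + 1)) N.sqrt)) +
          (i : Int) * ((N / i : Nat) : Int)) := by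
  unfold sumofproduct
  simp only [Int.toNat_natCast]
  show (List.foldl (fun sum i => sum + i * sumOfRangeA (PySem.Int.floordiv (N:Int) i) (max (PySem.Int.floordiv (N:Int) (i+1)) ((N.sqrt : Nat) : Int)) + i * PySem.Int.floordiv (N:Int) i) 0 (PySem.List.pyRange 1 (((N.sqrt : Nat) : Int) + 1) 1)) = _
  simp only [add_assoc]
  rw [PySem.List.foldl_add, PySem.List.pyRange_one, List.map_map]
  have h1 : ((((N.sqrt:Nat):Int) + 1) - 1).toNat = N.sqrt := by omega
  rw [h1, ← Finset.Ico_add_one_right_eq_Icc, Finset.sum_Ico_eq_sum_range]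
  have h2 : N.sqrt + 1 - 1 = N.sqrt := by omega
  rw [h2, zero_add]
  show (∑ k ∈ Finset.range N.sqrt,
      (((1:Int)+k) * sumOfRangeA (PySem.Int.floordiv (N:Int) (1+(k:Int)))
          (max (PySem.Int.floordiv (N:Int) ((1+(k:Int))+1)) ((N.sqrt : Nat) : Int))
        + ((1:Int)+k) * PySem.Int.floordiv (N:Int) (1+(k:Int)))) = _
  refine Finset.sum_congr rfl ?_
  intro k _
  have hc1 : ((1:Int) + k) = ((1+k : Nat) : Int) := by push_cast; ring
  have hc2 : ((1:Int) + k) + 1 = ((1+k+1 : Nat) : Int) := by push_cast; ring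
  rw [hc2, hc1, PySem.Int.floordiv_natCast, PySem.Int.floordiv_natCast]
  rw [← Nat.cast_max]
  rw [sumOfRangeA]
  rw [floordiv_tri]
  rw [floordiv_tri]

-- B's loop, from state (i = m, acc = total), adds the sum over t ∈ (m-1, N]
theorem altLoop_eq (N : Nat) : ∀ (fuel : Nat) (m : Nat) (total : Int), 1 ≤ m →
    N + 1 ≤ fuel + m →
    altLoop (N : Int) fuel (m : Int) total =
      total + ∑ t ∈ Finset.Ioc (m - 1) N, (t : Int) * ((N / t : Nat) : Int) := by
  intro fuel
  induction fuel with
  | zero =>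
      intro m total hm hf
      have : Finset.Ioc (m - 1) N = ∅ := Finset.Ioc_eq_empty (by omega)
      simp [altLoop, this]
  | succ fuel ih =>
      intro m total hm hf
      rw [altLoop]
      by_cases hmn : m ≤ N
      · rw [if_pos (by exact_mod_cast hmn)]
        dsimp only
        have hQ1 : 1 ≤ N / m := (Nat.one_le_div_iff (by omega)).mpr hmn
        have hq : PySem.Int.floordiv (N : Int) (m : Int) = ((N / m : Nat) : Int) :=
          PySem.Int.floordiv_natCast N m
        rw [hq]
        have hj : PySem.Int.floordiv (N : Int) ((N / m : Nat) : Int) = ((N / (N / m) : Nat) : Int) :=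
          PySem.Int.floordiv_natCast N (N / m)
        rw [hj]
        have hmJ : m ≤ N / (N / m) := by
          rw [Nat.le_div_iff_mul_le (by omega)]
          calc m * (N / m) = (N / m) * m := Nat.mul_comm m (N / m)
            _ ≤ N := Nat.div_mul_le_self N m
        have hJN : N / (N / m) ≤ N := Nat.div_le_self N (N / m)
        have hcast : ((N / (N / m) : Nat) : Int) + 1 = ((N / (N / m) + 1 : Nat) : Int) := by
          push_cast; ring
        rw [hcast, ih (N / (N / m) + 1) _ (by omega) (by omega)]
        have htriJ : PySem.Int.floordiv (((N / (N / m) : Nat) : Int) * ((N / (N / m) + 1 : Nat) : Int)) 2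
            = triZ (N / (N / m)) := by rw [← hcast]; exact floordiv_tri (N / (N / m))
        have hm1 : ((m : Int) - 1) = ((m - 1 : Nat) : Int) := by omega
        have htrim : PySem.Int.floordiv (((m : Int) - 1) * (m : Int)) 2 = triZ (m - 1) := by
          rw [hm1, show ((m : Nat) : Int) = (((m - 1) + 1 : Nat) : Int) from by omega]
          exact floordiv_tri (m - 1)
        rw [htriJ, htrim]
        -- split (m-1, N] at N/(N/m) and evaluate the constant-quotient block by Gauss
        have hsplit : (∑ t ∈ Finset.Ioc (m - 1) N, (t : Int) * ((N / t : Nat) : Int)) =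
            (∑ t ∈ Finset.Ioc (m - 1) (N / (N / m)), (t : Int) * ((N / t : Nat) : Int)) +
              ∑ t ∈ Finset.Ioc (N / (N / m) + 1 - 1) N, (t : Int) * ((N / t : Nat) : Int) := by
          rw [show N / (N / m) + 1 - 1 = N / (N / m) from rfl]
          exact (Finset.sum_Ioc_consecutive _ (by omega) hJN).symm
        rw [hsplit]
        have hblock : (∑ t ∈ Finset.Ioc (m - 1) (N / (N / m)), (t : Int) * ((N / t : Nat) : Int)) =
            ((N / m : Nat) : Int) * (triZ (N / (N / m)) - triZ (m - 1)) := by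
          have hconst : ∀ t ∈ Finset.Ioc (m - 1) (N / (N / m)), N / t = N / m := by
            intro t ht
            rw [Finset.mem_Ioc] at ht
            have ht1 : m ≤ t := by omega
            have hub : N / t ≤ N / m := Nat.div_le_div_left ht1 (by omega)
            have hlb : N / m ≤ N / t := by
              rw [Nat.le_div_iff_mul_le (by omega)]
              calc N / m * t ≤ N / m * (N / (N / m)) := Nat.mul_le_mul_left _ ht.2
                _ ≤ N := Nat.mul_div_le N (N / m)
            omega
          rw [Finset.sum_congr rfl (fun t ht => by rw [hconst t ht])]
          rw [show (∑ t ∈ Finset.Ioc (m - 1) (N / (N / m)), (t : Int) * ((N / m : Nat) : Int)) =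
              (∑ t ∈ Finset.Ioc (m - 1) (N / (N / m)), (t : Int)) * ((N / m : Nat) : Int) from
            (Finset.sum_mul _ _ _).symm]
          rw [gauss_Ioc _ _ (by omega)]
          ring
        rw [hblock]
        ring
      · rw [if_neg (by exact_mod_cast hmn)]
        have : Finset.Ioc (m - 1) N = ∅ := Finset.Ioc_eq_empty (by omega)
        simp [this]

-- B's port as a ℕ-indexed Finset sum
theorem altEq (N : Nat) :
    sumofproduct_alt (N : Int) = ∑ j ∈ Finset.Icc 1 N, (j : Int) * ((N / j : Nat) : Int) := by
  unfold sumofproduct_alt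
  rw [Int.toNat_natCast,
      show ((1 : Int)) = ((1 : Nat) : Int) from rfl,
      altLoop_eq N (N + 1) 1 0 (by omega) (by omega)]
  rw [show Finset.Icc 1 N = Finset.Ioc 0 N from rfl]
  simp

-- the fibre of the quotient map over i, inside (r, N], is the interval (max (N/(i+1)) r, N/i]
theorem fiber_eq (N i : Nat) (hi1 : 1 ≤ i) (hir : i ≤ N.sqrt) :
    (Finset.Ioc N.sqrt N).filter (fun j => N / j = i) =
      Finset.Ioc (max (N / (i + 1)) N.sqrt) (N / i) := by
  ext j
  simp only [Finset.mem_filter, Finset.mem_Ioc, max_lt_iff]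
  constructor
  · rintro ⟨⟨hrj, hjN⟩, hq⟩
    have hj0 : 0 < j := by omega
    refine ⟨⟨?_, hrj⟩, ?_⟩
    · by_contra h
      push Not at h
      have h2 : i + 1 ≤ N / j := by
        rw [Nat.le_div_iff_mul_le hj0]
        calc (i + 1) * j ≤ (i + 1) * (N / (i + 1)) := Nat.mul_le_mul_left _ h
          _ ≤ N := Nat.mul_div_le N (i + 1)
      omega
    · rw [Nat.le_div_iff_mul_le (show 0 < i by omega)]
      have h3 : N / j * j ≤ N := Nat.div_mul_le_self N j
      rw [hq] at h3
      calc j * i = i * j := Nat.mul_comm j i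
        _ ≤ N := h3
  · rintro ⟨⟨hlow, hrj⟩, hup⟩
    have hj0 : 0 < j := by omega
    have hiN : i ≤ N / j := by
      rw [Nat.le_div_iff_mul_le hj0]
      have h4 := (Nat.le_div_iff_mul_le (show 0 < i by omega)).mp hup
      calc i * j = j * i := Nat.mul_comm i j
        _ ≤ N := h4
    have hlt : N / j < i + 1 := by
      by_contra h
      push Not at h
      have h5 := (Nat.le_div_iff_mul_le hj0).mp h
      have h6 : j ≤ N / (i + 1) := by
        rw [Nat.le_div_iff_mul_le (show 0 < i + 1 by omega)]
        calc j * (i + 1) = (i + 1) * j := Nat.mul_comm j (i + 1)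
          _ ≤ N := h5
      omega
    exact ⟨⟨hrj, le_trans hup (Nat.div_le_self N i)⟩, by omega⟩

-- the divisor-block identity
theorem main_identity (N : Nat) :
    (∑ i ∈ Finset.Icc 1 N.sqrt,
        ((i : Int) * (triZ (N / i) - triZ (max (N / (i + 1)) N.sqrt)) +
          (i : Int) * ((N / i : Nat) : Int))) =
      ∑ j ∈ Finset.Icc 1 N, (j : Int) * ((N / j : Nat) : Int) := by
  have hrN : N.sqrt ≤ N := Nat.sqrt_le_self N
  have hsplit : (∑ j ∈ Finset.Icc 1 N, (j : Int) * ((N / j : Nat) : Int)) =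
      (∑ j ∈ Finset.Icc 1 N.sqrt, (j : Int) * ((N / j : Nat) : Int)) +
        ∑ j ∈ Finset.Ioc N.sqrt N, (j : Int) * ((N / j : Nat) : Int) := by
    rw [show Finset.Icc 1 N = Finset.Ioc 0 N from rfl,
        show Finset.Icc 1 N.sqrt = Finset.Ioc 0 N.sqrt from rfl]
    exact (Finset.sum_Ioc_consecutive _ (Nat.zero_le N.sqrt) hrN).symm
  rw [hsplit, Finset.sum_add_distrib]
  have key : (∑ i ∈ Finset.Icc 1 N.sqrt,
      (i : Int) * (triZ (N / i) - triZ (max (N / (i + 1)) N.sqrt))) =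
      ∑ j ∈ Finset.Ioc N.sqrt N, (j : Int) * ((N / j : Nat) : Int) := by
    rw [← Finset.sum_fiberwise_of_maps_to (g := fun j => N / j) (t := Finset.Icc 1 N.sqrt)
        (fun j hj => by
          rw [Finset.mem_Ioc] at hj
          rw [Finset.mem_Icc]
          show 1 ≤ N / j ∧ N / j ≤ N.sqrt
          have hj0 : 0 < j := by omega
          refine ⟨(Nat.one_le_div_iff hj0).mpr hj.2, ?_⟩
          have ha : N / j ≤ N / (N.sqrt + 1) :=
            Nat.div_le_div_left (by omega) (by omega)
          have hb : N / (N.sqrt + 1) < N.sqrt + 1 := by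
            rw [Nat.div_lt_iff_lt_mul (by omega)]
            exact Nat.lt_succ_sqrt N
          omega)
        (fun j => (j : Int) * ((N / j : Nat) : Int))]
    refine Finset.sum_congr rfl ?_
    intro i hi
    rw [Finset.mem_Icc] at hi
    have hfib := fiber_eq N i hi.1 hi.2
    rw [hfib]
    have hmem : ∀ j ∈ Finset.Ioc (max (N / (i + 1)) N.sqrt) (N / i), N / j = i := by
      intro j hj
      have : j ∈ (Finset.Ioc N.sqrt N).filter (fun j => N / j = i) := by
        rw [hfib]; exact hj
      exact (Finset.mem_filter.mp this).2
    rw [Finset.sum_congr rfl (fun j hj => by rw [hmem j hj])]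
    have hle : max (N / (i + 1)) N.sqrt ≤ N / i := by
      have h1 : N / (i + 1) ≤ N / i := Nat.div_le_div_left (by omega) (by omega)
      have h2 : N.sqrt ≤ N / i := by
        rw [Nat.le_div_iff_mul_le (show 0 < i by omega)]
        calc N.sqrt * i ≤ N.sqrt * N.sqrt := Nat.mul_le_mul_left _ hi.2
          _ ≤ N := Nat.sqrt_le N
      exact max_le h1 h2
    rw [show (∑ j ∈ Finset.Ioc (max (N / (i + 1)) N.sqrt) (N / i), (j : Int) * ((i : Nat) : Int)) =
        (∑ j ∈ Finset.Ioc (max (N / (i + 1)) N.sqrt) (N / i), (j : Int)) * (i : Int) from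
      (Finset.sum_mul _ _ _).symm]
    rw [gauss_Ioc _ _ hle]
    ring
  rw [key]
  ring

-- ===== VERDICT (by name: the statement is the Claim_ definition above) =====
theorem sumofproduct_spec : Claim_equal_sumofproduct := by
  intro n _ hpre
  have hn : ((n.toNat : Nat) : Int) = n := Int.toNat_of_nonneg hpre
  unfold Spec_sumofproduct
  rw [← hn, aEq, altEq, main_identity]

theorem sumofproduct_raises : Claim_raises_sumofproduct := by
  unfold Claim_raises_sumofproduct
  exact ⟨by intro n _ h; unfold Raises_sumofproduct at h; unfold Pre_sumofproduct; omega,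
         by decide⟩

-- self-check: B's port really returns the stated literal at the raise witness
theorem pvRaiseWitness_ok :
    sumofproduct_alt pvRaiseWitness_sumofproduct = pvRaiseWitnessOut_sumofproduct :=
  sumofproduct_raises.2.2.2
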